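-- pv_equiv track=rewrite | github.com/dyeap-zz/CS_Practice | Facebook/SlowSums.py | slowsum
-- ===== SOURCE A (Python) =====
-- def slowsum(arr):
--     arr.sort()
--     n = len(arr)
--     if n < 2: return 0
--
--     res = arr[-1] + arr[-2] # 7
--     prev = res
--     for i in range(n-3,-1,-1): # 1
--         prev += arr[i] # 17
--         res += prev   # 16
--     return res
-- ===== SOURCE B (Python) =====
-- def slowsum(arr):
--     arr.sort()
--     n = len(arr)
--     if n < 2: return 0
--     return sum((i + 1) * v for i, v in enumerate(arr)) - arr[-1]
-- ===== Notes on version B (the rewrite author's own statement) =====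
-- stated objective: simpler
-- what changed: Replaced the reverse double-accumulator loop (running suffix sum plus running total) by a closed-form weighted sum: each sorted element weighted by its ascending position plus one, minus the last (largest) element once.
import Mathlib
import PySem

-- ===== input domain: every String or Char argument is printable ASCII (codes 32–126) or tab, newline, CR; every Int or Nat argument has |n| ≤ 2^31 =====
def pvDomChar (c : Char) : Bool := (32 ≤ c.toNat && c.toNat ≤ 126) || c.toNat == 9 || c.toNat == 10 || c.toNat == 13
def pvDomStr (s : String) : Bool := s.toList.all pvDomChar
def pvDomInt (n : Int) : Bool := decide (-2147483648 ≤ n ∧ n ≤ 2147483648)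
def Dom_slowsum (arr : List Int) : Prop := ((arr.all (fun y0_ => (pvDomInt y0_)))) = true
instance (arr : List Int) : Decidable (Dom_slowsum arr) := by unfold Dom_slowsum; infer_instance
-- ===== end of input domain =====

-- B replaces A's reverse double-accumulator loop by a closed-form weighted sum over the
-- sorted array (simpler); both sort arr in place in Python — return-value equivalence proved here.


-- ===== PORT A =====
def slowsum (arr : List Int) : Int :=
  let s := PySem.List.sorted arr (fun x => x) false   -- arr.sort()
  let n : Int := s.length
  if n < 2 then 0
  else
    let res := PySem.List.pyGetD s (-1) 0 + PySem.List.pyGetD s (-2) 0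
    let st := (PySem.List.pyRange (n - 3) (-1) (-1)).foldl
      (fun (st : Int × Int) i =>
        let prev := st.2 + PySem.List.pyGetD s i 0   -- prev += arr[i]
        (st.1 + prev, prev))                          -- res += prev
      (res, res)
    st.1

-- ===== PORT B =====
def slowsum_alt (arr : List Int) : Int :=
  let s := PySem.List.sorted arr (fun x => x) false   -- arr.sort()
  let n : Int := s.length
  if n < 2 then 0
  else
    ((PySem.List.enumerate s 0).foldl (fun acc p => acc + (p.1 + 1) * p.2) 0)
      - PySem.List.pyGetD s (-1) 0

-- ===== PRECONDITION & SPEC =====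
def Spec_slowsum (arr : List Int) (out : Int) : Prop := out = slowsum_alt arr
instance (arr : List Int) (out : Int) : Decidable (Spec_slowsum arr out) := by unfold Spec_slowsum; infer_instance

-- ===== CLAIM (what is proved, stated in full; the proofs are below) =====
def Claim_equal_slowsum : Prop := ∀ (arr : List Int), Dom_slowsum arr → Spec_slowsum arr (slowsum arr)

-- ===== LEMMAS AND PROOFS =====

-- weighted prefix: ∑_{j<k} (j+1)·s[j]
def wsum (s : List Int) (k : Nat) : Int :=
  ∑ j ∈ Finset.range k, ((j : Int) + 1) * s.getD j 0

-- plain prefix sum: ∑_{j<k} s[j]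
def psum (s : List Int) (k : Nat) : Int :=
  ∑ j ∈ Finset.range k, s.getD j 0

-- A's countdown loop in closed form
theorem loopA (s : List Int) (k : Nat) : ∀ res prev : Int,
    (PySem.List.pyRange ((k : Int) - 1) (-1) (-1)).foldl
      (fun (st : Int × Int) i =>
        let prev := st.2 + PySem.List.pyGetD s i 0
        (st.1 + prev, prev)) (res, prev)
    = (res + k * prev + wsum s k, prev + psum s k) := by
  induction k with
  | zero =>
    intro res prev
    rw [PySem.List.pyRange_neg_one_eq_nil (by omega)]
    simp [wsum, psum]
  | succ k ih =>
    intro res prev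
    have h1 : ((k + 1 : Nat) : Int) - 1 = (k : Int) := by push_cast; ring
    rw [h1, PySem.List.pyRange_neg_one_cons (by omega)]
    simp only [List.foldl_cons, PySem.List.pyGetD_natCast]
    rw [ih]
    simp only [Prod.mk.injEq]
    refine ⟨?_, ?_⟩
    · simp only [wsum, Finset.sum_range_succ]; push_cast; ring
    · simp only [psum, Finset.sum_range_succ]; ring

-- B's enumerate-fold in closed form (offset-generalised)
theorem loopB (s : List Int) : ∀ a acc : Int,
    (PySem.List.enumerate s a).foldl (fun acc p => acc + (p.1 + 1) * p.2) acc
    = acc + ∑ j ∈ Finset.range s.length, (a + (j : Int) + 1) * s.getD j 0 := by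
  induction s with
  | nil => intro a acc; simp [PySem.List.enumerate_nil]
  | cons x t ih =>
    intro a acc
    rw [PySem.List.enumerate_cons, List.foldl_cons, ih]
    simp only [List.length_cons]
    rw [Finset.sum_range_succ' (fun j => (a + (j : Int) + 1) * (x :: t).getD j 0) t.length]
    simp only [List.getD_cons_succ, List.getD_cons_zero]
    push_cast
    have hb : ∑ j ∈ Finset.range t.length, (a + ((j : Int) + 1) + 1) * t.getD j 0
            = ∑ j ∈ Finset.range t.length, (a + 1 + (j : Int) + 1) * t.getD j 0 :=
      Finset.sum_congr rfl (fun j _ => by ring)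
    rw [hb]
    ring

-- ===== VERDICT (by name: the statement is the Claim_ definition above) =====
theorem slowsum_spec : Claim_equal_slowsum := by
  intro arr _
  unfold Spec_slowsum slowsum slowsum_alt
  set s := PySem.List.sorted arr (fun x => x) false with hs
  by_cases h : (s.length : Int) < 2
  · simp [h]
  · simp only [h, if_false]
    have hN : 2 ≤ s.length := by omega
    -- rewrite negative indices
    have hm1 : PySem.List.pyGetD s (-1) 0 = s.getD (s.length - 1) 0 := by
      rw [PySem.List.pyGetD_neg_ofNat s 1 0 (by omega) (by omega)]
      rw [List.getD_eq_getElem s 0 (by omega)]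
    have hm2 : PySem.List.pyGetD s (-2) 0 = s.getD (s.length - 2) 0 := by
      rw [PySem.List.pyGetD_neg_ofNat s 2 0 (by omega) (by omega)]
      rw [List.getD_eq_getElem s 0 (by omega)]
    have hrange : (s.length : Int) - 3 = ((s.length - 2 : Nat) : Int) - 1 := by
      push_cast [Nat.cast_sub hN]; ring
    rw [hm1, hm2, hrange, loopA s (s.length - 2), loopB s 0]
    obtain ⟨m, hm⟩ : ∃ m, s.length = m + 2 := ⟨s.length - 2, by omega⟩
    simp only [hm, Nat.add_sub_cancel, Nat.succ_sub_one]
    have hb : ∑ j ∈ Finset.range (m + 2), ((0 : Int) + (j : Int) + 1) * s.getD j 0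
            = ∑ j ∈ Finset.range (m + 2), ((j : Int) + 1) * s.getD j 0 :=
      Finset.sum_congr rfl (fun j _ => by ring)
    rw [hb, Finset.sum_range_succ, Finset.sum_range_succ]
    unfold wsum
    push_cast
    ring
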